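-- pv_equiv track=rewrite | github.com/thomasjball/PyExZ3 | test/cseppento3.py | cseppento3
-- ===== SOURCE A (Python) =====
-- def cseppento3(x):
--     # based on B3c_DoWhile by Lajos Cseppento
--     # see: L. Cseppento: Comparison of Symbolic Execution Based Test Generation Tools, B.Sc. Thesis, Budapest University of Technology and Economics, 2013.
--
-- # Sum of the positive integers <= min (x, 100)
-- # 1+2+4+5+7+8+...[+98+100]
--     i = 1
--     sum = 0
--     while (i<=x):
--         i = i + 1
--         if (i % 3 == 0):
--             continue
--         if (i > 100):
--             break
--         sum = sum + i
--     return sum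
-- ===== SOURCE B (Python) =====
-- def cseppento3(x):
--     U = min(x + 1, 100)
--     if U < 2:
--         return 0
--     m = U // 3
--     return U * (U + 1) // 2 - 1 - 3 * m * (m + 1) // 2
-- ===== Notes on version B (the rewrite author's own statement) =====
-- stated objective: simpler
-- what changed: Replaces A's while-loop that accumulates non-multiples-of-3 one by one with a closed-form arithmetic formula: U = min(x+1, 100), answer = U(U+1)/2 - 1 - 3m(m+1)/2 with m = U//3 (0 if U < 2).
import Mathlib
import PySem

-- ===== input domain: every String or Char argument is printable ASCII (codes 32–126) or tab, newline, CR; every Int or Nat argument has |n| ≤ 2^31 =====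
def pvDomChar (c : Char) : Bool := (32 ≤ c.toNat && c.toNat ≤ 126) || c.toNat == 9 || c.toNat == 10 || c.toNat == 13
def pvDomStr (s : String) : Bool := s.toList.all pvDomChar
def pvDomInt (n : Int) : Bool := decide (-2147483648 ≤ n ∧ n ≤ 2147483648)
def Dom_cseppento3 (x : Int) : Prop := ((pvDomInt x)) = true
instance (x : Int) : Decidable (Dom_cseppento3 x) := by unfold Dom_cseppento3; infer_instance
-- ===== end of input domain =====

-- B replaces A's bounded while-loop with a closed-form arithmetic formula (objective: simpler, no iteration).

-- ===== PORT A =====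
-- the while loop, step for step; fuel = number of remaining iterations of the guard i ≤ x
-- (fuel = (x - i + 1).toNat, so fuel = 0 ↔ the guard i ≤ x fails): a totality guard only.
def cseppento3Loop (fuel : Nat) (i sum : Int) : Int :=
  match fuel with
  | 0 => sum                                      -- while guard i ≤ x is false
  | n + 1 =>
    let i' := i + 1
    if PySem.Int.mod i' 3 = 0 then cseppento3Loop n i' sum      -- continue
    else if i' > 100 then sum                                   -- break
    else cseppento3Loop n i' (sum + i')

def cseppento3 (x : Int) : Int := cseppento3Loop x.toNat 1 0

-- ===== PORT B =====
def cseppento3_alt (x : Int) : Int :=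
  let U := min (x + 1) 100
  if U < 2 then 0
  else
    let m := PySem.Int.floordiv U 3
    PySem.Int.floordiv (U * (U + 1)) 2 - 1 - PySem.Int.floordiv (3 * m * (m + 1)) 2

-- ===== PRECONDITION & SPEC =====
def Spec_cseppento3 (x : Int) (out : Int) : Prop := out = cseppento3_alt x
instance (x : Int) (out : Int) : Decidable (Spec_cseppento3 x out) := by unfold Spec_cseppento3; infer_instance

-- ===== CLAIM (what is proved, stated in full; the proofs are below) =====
def Claim_equal_cseppento3 : Prop := ∀ (x : Int), Dom_cseppento3 x → Spec_cseppento3 x (cseppento3 x)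

-- ===== LEMMAS AND PROOFS =====

-- once fuel exceeds the steps to the break at i = 101, its exact value is irrelevant
theorem loop_fuel_irrel : ∀ (f₁ : Nat), ∀ (f₂ : Nat) (i s : Int), 1 ≤ i → i ≤ 100 →
    (100 - i).toNat < f₁ → (100 - i).toNat < f₂ →
    cseppento3Loop f₁ i s = cseppento3Loop f₂ i s := by
  intro f₁
  induction f₁ with
  | zero => intro f₂ i s _ _ h _; omega
  | succ n ih =>
      intro f₂ i s h1 h2 hf1 hf2
      match f₂ with
      | 0 => omega
      | m + 1 =>
        rw [cseppento3Loop, cseppento3Loop]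
        by_cases hm : PySem.Int.mod (i + 1) 3 = 0
        · simp only [if_pos hm]
          have hd : (3:Int) ∣ (i + 1) := by
            have := PySem.Int.mod_eq_zero_iff_dvd (i+1) 3
            tauto
          have h99 : i + 1 ≤ 100 := by omega
          exact ih m (i+1) s (by omega) h99 (by omega) (by omega)
        · simp only [if_neg hm]
          by_cases hb : i + 1 > 100
          · simp [hb]
          · simp only [if_neg hb]
            exact ih m (i+1) (s + (i+1)) (by omega) (by omega) (by omega) (by omega)

theorem alt_clamp (x : Int) (hx : 100 ≤ x) : cseppento3_alt x = cseppento3_alt 100 := by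
  unfold cseppento3_alt
  have : min (x + 1) 100 = min (100 + 1) 100 := by omega
  rw [this]

-- the finite range 0 ≤ x ≤ 100 checked exhaustively
theorem small_cases : ∀ n : Fin 101, cseppento3 (n.val : Int) = cseppento3_alt (n.val : Int) := by
  decide

theorem cseppento3_spec' : ∀ (x : Int), cseppento3 x = cseppento3_alt x := by
  intro x
  by_cases hbig : 100 ≤ x
  · have hA : cseppento3 x = cseppento3 100 := by
      unfold cseppento3
      exact loop_fuel_irrel x.toNat (100:Int).toNat 1 0 (by omega) (by omega) (by omega) (by omega)
    rw [hA, alt_clamp x hbig]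
    have := small_cases ⟨100, by omega⟩
    simpa using this
  · by_cases hneg : x < 0
    · -- loop gets zero fuel (the guard 1 ≤ x fails at once); U = x+1 < 2
      have h0 : x.toNat = 0 := by omega
      rw [cseppento3, h0, cseppento3Loop]
      unfold cseppento3_alt
      have : min (x + 1) 100 < 2 := by omega
      simp [this]
    · -- 0 ≤ x ≤ 99
      have hx100 : x.toNat < 101 := by omega
      have := small_cases ⟨x.toNat, hx100⟩
      have hc : ((x.toNat : Int)) = x := by omega
      simpa [hc] using this

-- ===== VERDICT (by name: the statement is the Claim_ definition above) =====
theorem cseppento3_spec : Claim_equal_cseppento3 := by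
  intro x _
  exact cseppento3_spec' x
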